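-- pv_equiv track=rewrite | github.com/mostafaAsala/ML-project | ner_model.py | _validate_samples
-- ===== SOURCE A (Python) =====
-- from typing import List, Dict, Tuple, Optional, Any
--
-- def _validate_samples(samples: List[Tuple]) -> List[Tuple]:
--     """Validate training samples for overlapping entities."""
--     valid_samples = []
--
--     for text, annotations in samples:
--         entities = annotations.get('entities', [])
--         entities_sorted = sorted(entities, key=lambda x: x[0])
--
--         is_valid = True
--         # Check for overlaps
--         for i in range(len(entities_sorted) - 1):
--             current_start, current_end, _ = entities_sorted[i]
--             next_start, _, _ = entities_sorted[i + 1]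
--             if current_end > next_start:
--                 is_valid = False
--                 break
--
--         # Check bounds
--         if is_valid:
--             for start, end, _ in entities:
--                 if start < 0 or end > len(text) or start >= end:
--                     is_valid = False
--                     break
--
--         if is_valid:
--             valid_samples.append((text, annotations))
--
--     return valid_samples
-- ===== SOURCE B (Python) =====
-- from typing import List, Tuple
--
-- def _validate_samples(samples: List[Tuple]) -> List[Tuple]:
--     """Validate training samples for overlapping entities (no sort: all-pairs scan)."""
--     valid_samples = []
--
--     for text, annotations in samples:
--         entities = annotations.get('entities', [])
--         n = len(text)
--
--         ok = all(0 <= s and e <= n and s < e for s, e, _ in entities)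
--
--         if ok:
--             for i in range(len(entities)):
--                 si, ei, _ = entities[i]
--                 for j in range(i + 1, len(entities)):
--                     sj, ej, _ = entities[j]
--                     if ei > sj and ej > si:
--                         ok = False
--                         break
--                 if not ok:
--                     break
--
--         if ok:
--             valid_samples.append((text, annotations))
--
--     return valid_samples
-- ===== Notes on version B (the rewrite author's own statement) =====
-- stated objective: alternative
-- what changed: Replaced A's sort-then-adjacent-pair overlap scan with a sort-free all-pairs symmetric overlap scan, and checks bounds (including start < end) before overlaps instead of after.
import Mathlib
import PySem

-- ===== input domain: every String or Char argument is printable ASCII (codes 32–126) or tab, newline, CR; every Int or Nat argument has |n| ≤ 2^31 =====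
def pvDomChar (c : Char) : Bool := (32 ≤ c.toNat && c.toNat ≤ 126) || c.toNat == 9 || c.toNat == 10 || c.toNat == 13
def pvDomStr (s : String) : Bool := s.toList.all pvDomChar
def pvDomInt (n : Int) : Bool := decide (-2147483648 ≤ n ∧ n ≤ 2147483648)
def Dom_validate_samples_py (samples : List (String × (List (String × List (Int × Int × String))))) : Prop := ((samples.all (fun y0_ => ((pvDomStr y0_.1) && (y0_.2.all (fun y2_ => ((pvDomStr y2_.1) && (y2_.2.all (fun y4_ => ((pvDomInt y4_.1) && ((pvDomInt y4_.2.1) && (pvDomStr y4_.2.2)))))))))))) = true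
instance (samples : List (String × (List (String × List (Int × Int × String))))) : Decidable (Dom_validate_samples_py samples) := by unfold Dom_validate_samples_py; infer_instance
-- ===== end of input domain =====

-- B replaces A's sort-then-adjacent-scan overlap check by a sort-free all-pairs symmetric
-- overlap scan and checks bounds first; same returned list (alternative decomposition).

-- ===== PORT A =====
-- 'for i in range(len(es)-1): if es[i][1] > es[i+1][0]: is_valid = False; break'
def vspAdjOk : List (Int × Int × String) → Bool
  | x :: y :: rest => if x.2.1 > y.1 then false else vspAdjOk (y :: rest)
  | _ => true

-- 'for start, end, _ in entities: if start < 0 or end > len(text) or start >= end: break'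
def vspBoundsA (n : Int) : List (Int × Int × String) → Bool
  | [] => true
  | (s, e, _) :: rest => if s < 0 || e > n || s ≥ e then false else vspBoundsA n rest

def validate_samples_py (samples : List (String × (List (String × List (Int × Int × String))))) : List (String × (List (String × List (Int × Int × String)))) :=
  samples.foldl (fun acc p =>
    let text := p.1
    let entities := (PySem.Dict.mk p.2).getD "entities" []
    let entities_sorted := PySem.List.sorted entities (fun x => x.1) false
    let is_valid := vspAdjOk entities_sorted
    let is_valid := if is_valid then vspBoundsA (PySem.Str.len text) entities else is_valid
    if is_valid then acc ++ [p] else acc) []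

-- ===== PORT B =====
-- 'ok = all(0 <= s and e <= n and s < e for s, e, _ in entities)'
def vspBoundsB (n : Int) (entities : List (Int × Int × String)) : Bool :=
  entities.all (fun z => decide (0 ≤ z.1) && decide (z.2.1 ≤ n) && decide (z.1 < z.2.1))

-- the nested all-pairs loops with break: each element against everything after it
def vspPairOk : List (Int × Int × String) → Bool
  | [] => true
  | x :: rest => rest.all (fun y => !(decide (x.2.1 > y.1) && decide (y.2.1 > x.1))) && vspPairOk rest

def validate_samples_py_alt (samples : List (String × (List (String × List (Int × Int × String))))) : List (String × (List (String × List (Int × Int × String)))) :=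
  samples.foldl (fun acc p =>
    let entities := (PySem.Dict.mk p.2).getD "entities" []
    let ok := vspBoundsB (PySem.Str.len p.1) entities && vspPairOk entities
    if ok then acc ++ [p] else acc) []

-- ===== PRECONDITION & SPEC =====
-- explicit DecidableEq for the nested result type (plain infer_instance exceeds the default search size)
def vspDecEq : DecidableEq (List (String × (List (String × List (Int × Int × String))))) :=
  @instDecidableEqList _ (@instDecidableEqProd _ _ _ (@instDecidableEqList _ (@instDecidableEqProd _ _ _ inferInstance)))

def Spec_validate_samples_py (samples : List (String × (List (String × List (Int × Int × String))))) (out : List (String × (List (String × List (Int × Int × String))))) : Prop := out = validate_samples_py_alt samples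
instance (samples : List (String × (List (String × List (Int × Int × String))))) (out : List (String × (List (String × List (Int × Int × String))))) : Decidable (Spec_validate_samples_py samples out) := by unfold Spec_validate_samples_py; exact vspDecEq out _

-- ===== CLAIM (what is proved, stated in full; the proofs are below) =====
def Claim_equal_validate_samples_py : Prop := ∀ (samples : List (String × (List (String × List (Int × Int × String))))), Dom_validate_samples_py samples → Spec_validate_samples_py samples (validate_samples_py samples)

-- ===== LEMMAS AND PROOFS =====

lemma vspBoundsA_eq_boundsB (n : Int) (es : List (Int × Int × String)) :
    vspBoundsA n es = vspBoundsB n es := by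
  induction es with
  | nil => rfl
  | cons z rest ih =>
    obtain ⟨s, e, l⟩ := z
    have g1 : ((0:Int) ≤ s) ↔ ¬ (s < 0) := by omega
    have g2 : (e ≤ n) ↔ ¬ (e > n) := by omega
    have g3 : (s < e) ↔ ¬ (s ≥ e) := by omega
    simp only [vspBoundsA, vspBoundsB, List.all_cons] at *
    by_cases h1 : s < 0 <;> by_cases h2 : e > n <;> by_cases h3 : s ≥ e <;>
      simp [h1, h2, h3, g1, g2, g3, ih]

lemma vspPairOk_iff (es : List (Int × Int × String)) :
    vspPairOk es = true ↔ es.Pairwise (fun x y => ¬ (x.2.1 > y.1 ∧ y.2.1 > x.1)) := by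
  induction es with
  | nil => simp [vspPairOk]
  | cons x rest ih =>
    simp only [vspPairOk, Bool.and_eq_true, List.all_eq_true, List.pairwise_cons, ih]
    constructor
    · rintro ⟨h1, h2⟩
      refine ⟨fun y hy => ?_, h2⟩
      have := h1 y hy
      simp only [Bool.not_eq_true', Bool.and_eq_false_iff, decide_eq_false_iff_not] at this
      omega
    · rintro ⟨h1, h2⟩
      refine ⟨fun y hy => ?_, h2⟩
      have := h1 y hy
      simp only [Bool.not_eq_true', Bool.and_eq_false_iff, decide_eq_false_iff_not]
      omega

lemma vspAdjOk_iff (es : List (Int × Int × String)) :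
    vspAdjOk es = true ↔ es.IsChain (fun x y => x.2.1 ≤ y.1) := by
  induction es with
  | nil => simp [vspAdjOk]
  | cons x rest ih =>
    cases rest with
    | nil => simp [vspAdjOk]
    | cons y t =>
      simp only [vspAdjOk, List.isChain_cons_cons]
      by_cases h : x.2.1 > y.1
      · rw [if_pos h]; simp; omega
      · rw [if_neg h, ih]
        constructor
        · intro h2; exact ⟨by omega, h2⟩
        · rintro ⟨_, h2⟩; exact h2

-- on a start-sorted list whose entities all satisfy start < end, the adjacent check
-- finds an overlap iff some (unordered) pair of entities overlaps
lemma vspChain_iff_pairwise (ss : List (Int × Int × String))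
    (hsort : ss.Pairwise (fun a b => a.1 ≤ b.1))
    (hlt : ∀ z ∈ ss, z.1 < z.2.1) :
    ss.IsChain (fun x y => x.2.1 ≤ y.1) ↔
      ss.Pairwise (fun x y => ¬ (x.2.1 > y.1 ∧ y.2.1 > x.1)) := by
  induction ss with
  | nil => simp
  | cons x rest ih =>
    rcases List.pairwise_cons.mp hsort with ⟨hx, hrest⟩
    have hlt' : ∀ z ∈ rest, z.1 < z.2.1 := fun z hz => hlt z (List.mem_cons_of_mem _ hz)
    rw [List.isChain_cons, List.pairwise_cons, ih hrest hlt']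
    cases rest with
    | nil => simp
    | cons w t =>
      constructor
      · rintro ⟨hhead, hpw⟩
        have hxw : x.2.1 ≤ w.1 := hhead w rfl
        refine ⟨fun y hy => ?_, hpw⟩
        rcases List.mem_cons.mp hy with rfl | hy'
        · omega
        · have : w.1 ≤ y.1 := (List.pairwise_cons.mp hrest).1 y hy'
          omega
      · rintro ⟨hall, hpw⟩
        refine ⟨?_, hpw⟩
        intro y hy
        simp only [List.head?_cons, Option.mem_def, Option.some.injEq] at hy
        subst hy
        have hno := hall w List.mem_cons_self
        have hxy : x.1 ≤ w.1 := hx w List.mem_cons_self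
        have := hlt' w List.mem_cons_self
        omega

lemma vspOverlapSym : ∀ {x y : Int × Int × String},
    ¬ ((x.2.1 > y.1 ∧ y.2.1 > x.1)) → ¬ ((y.2.1 > x.1 ∧ x.2.1 > y.1)) := by
  intro x y h; omega

-- when all entities are in bounds, A's sorted adjacent scan equals B's all-pairs scan
lemma vspAdj_eq_pair (n : Int) (es : List (Int × Int × String)) (hb : vspBoundsB n es = true) :
    vspAdjOk (PySem.List.sorted es (fun x => x.1) false) = vspPairOk es := by
  have hlt : ∀ z ∈ PySem.List.sorted es (fun x => x.1) false, z.1 < z.2.1 := by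
    intro z hz
    have hz' : z ∈ es := (PySem.List.mem_sorted _ _ _ _).mp hz
    have := List.all_eq_true.mp hb z hz'
    simp only [Bool.and_eq_true, decide_eq_true_eq] at this
    omega
  have hsort := PySem.List.sorted_pairwise (xs := es) (key := fun x => x.1)
  have h1 := vspAdjOk_iff (PySem.List.sorted es (fun x => x.1) false)
  have h2 := vspChain_iff_pairwise _ hsort hlt
  have h3 := List.Perm.pairwise_iff (R := fun x y : Int × Int × String => ¬ (x.2.1 > y.1 ∧ y.2.1 > x.1))
    (fun {x y} h => vspOverlapSym h) (PySem.List.sorted_perm es (fun x => x.1) false)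
  have h4 := vspPairOk_iff es
  cases ha : vspAdjOk (PySem.List.sorted es (fun x => x.1) false) with
  | true =>
    exact ((h4.mpr (h3.mp (h2.mp (h1.mp ha))))).symm
  | false =>
    cases hp : vspPairOk es with
    | true =>
      have := h1.mpr (h2.mpr (h3.mpr (h4.mp hp)))
      rw [ha] at this; cases this
    | false => rfl

-- per-sample validity: A's flag equals B's flag
lemma vsp_sample_eq (n : Int) (es : List (Int × Int × String)) :
    (if vspAdjOk (PySem.List.sorted es (fun x => x.1) false) then vspBoundsA n es
     else vspAdjOk (PySem.List.sorted es (fun x => x.1) false)) =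
    (vspBoundsB n es && vspPairOk es) := by
  cases hb : vspBoundsB n es with
  | true =>
    rw [vspAdj_eq_pair n es hb]
    cases hp : vspPairOk es with
    | true => simp [vspBoundsA_eq_boundsB, hb]
    | false => simp
  | false =>
    have hA : vspBoundsA n es = false := by rw [vspBoundsA_eq_boundsB, hb]
    cases ha : vspAdjOk (PySem.List.sorted es (fun x => x.1) false) <;> simp [hA]

-- ===== VERDICT (by name: the statement is the Claim_ definition above) =====
theorem validate_samples_py_spec : Claim_equal_validate_samples_py := by
  intro samples _
  unfold Spec_validate_samples_py validate_samples_py validate_samples_py_alt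
  apply PySem.List.foldl_congr_mem
  intro acc p _
  have h := vsp_sample_eq (PySem.Str.len p.1) ((PySem.Dict.mk p.2).getD "entities" [])
  simp only [] at h ⊢
  rw [h]
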